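-- pv_equiv track=rewrite | github.com/YasiTL/aoc-2021 | day10.py | disgardCorrupted
-- ===== SOURCE A (Python) =====
-- def disgardCorrupted(my_input):
--     altered_input = my_input.copy()
--     pairs = {')':'(', ']':'[', '}':'{', '>':'<' }
--     for line in my_input:
--         stack = []
--         for char in line:
--             if char in pairs:
--                 # check that the end of the stack matches pairs [char]
--                 if stack[-1] != pairs[char]:
--                     altered_input.remove(line)
--                     break
--                 else:
--                     stack.pop()
--             else:
--                 stack.append(char)
--     return altered_input
-- ===== SOURCE B (Python) =====
-- def disgardCorrupted(my_input):
--     pairs = {')': '(', ']': '[', '}': '{', '>': '<'}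
--
--     def corrupted(line):
--         stack = []
--         for ch in line:
--             if ch in pairs:
--                 if not stack or stack[-1] != pairs[ch]:
--                     return True
--                 stack.pop()
--             else:
--                 stack.append(ch)
--         return False
--
--     return [line for line in my_input if not corrupted(line)]
-- ===== Notes on version B (the rewrite author's own statement) =====
-- stated objective: simpler
-- what changed: B filters the list in one pass with a short-circuiting per-line corruption check, instead of A's copy-then-list.remove scan per corrupted line; where A raises IndexError (a line closing with nothing open), outside Pre_, B drops the line.
import Mathlib
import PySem

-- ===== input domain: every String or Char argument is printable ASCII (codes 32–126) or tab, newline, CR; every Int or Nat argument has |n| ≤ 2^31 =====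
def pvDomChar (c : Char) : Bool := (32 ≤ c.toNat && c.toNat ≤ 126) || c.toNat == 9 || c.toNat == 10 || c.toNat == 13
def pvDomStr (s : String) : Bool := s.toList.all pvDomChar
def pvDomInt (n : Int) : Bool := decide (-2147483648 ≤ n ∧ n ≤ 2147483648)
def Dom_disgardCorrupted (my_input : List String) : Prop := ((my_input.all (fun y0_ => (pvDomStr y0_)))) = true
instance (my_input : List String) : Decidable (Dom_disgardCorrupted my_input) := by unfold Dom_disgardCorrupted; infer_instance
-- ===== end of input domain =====

-- B filters in one pass with a per-line check instead of A's copy-then-list.remove; A raises IndexError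
-- on a line whose first anomaly is a closer on an empty stack — excluded by Pre_, B drops such a line.

-- ===== PORT A =====
-- pairs = {')':'(', ']':'[', '}':'{', '>':'<'}  (char in pairs / pairs[char] = this lookup)
def pairsA (c : Char) : Option Char :=
  if c = ')' then some '(' else
  if c = ']' then some '[' else
  if c = '}' then some '{' else
  if c = '>' then some '<' else none

-- A's inner loop over the line's chars, with stack kept back-to-front as in Python
-- (stack[-1] = pyGet? stack (-1); stack.pop() = dropLast; stack.append = ++ [c]);
-- returns true iff the loop hits 'altered_input.remove(line); break'.
-- Where Python raises IndexError (pyGet? = none, empty stack) this port returns true; Pre_ excludes those inputs.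
def lineRemovedA : List Char → List Char → Bool
  | [], _ => false
  | c :: rest, stack =>
    match pairsA c with
    | some opener =>
      match PySem.List.pyGet? stack (-1) with
      | some top => if top ≠ opener then true else lineRemovedA rest stack.dropLast
      | none => true
    | none => lineRemovedA rest (stack ++ [c])

def disgardCorrupted (my_input : List String) : List String :=
  my_input.foldl
    (fun altered line =>
      if lineRemovedA line.toList [] then (PySem.List.remove? altered line).getD altered
      else altered)
    my_input

-- ===== PORT B =====
def openerOf (c : Char) : Char :=
  if c = ')' then '(' else if c = ']' then '[' else if c = '}' then '{' else '<'

def isCloser (c : Char) : Bool := c = ')' || c = ']' || c = '}' || c = '>'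

-- B's corrupted(line): stack kept front-to-back (cons/head), early return on anomaly
def corruptedB : List Char → List Char → Bool
  | [], _ => false
  | c :: rest, stack =>
    if isCloser c then
      match stack with
      | [] => true
      | top :: stk => if top = openerOf c then corruptedB rest stk else true
    else corruptedB rest (c :: stack)

def disgardCorrupted_alt (my_input : List String) : List String :=
  my_input.filter (fun line => !corruptedB line.toList [])

-- ===== PRECONDITION & SPEC =====
-- true iff A's scan of the line hits a closing bracket while the stack is empty (before any mismatch):
-- exactly where Python A raises IndexError on stack[-1].
def lineRaises : List Char → List Char → Bool
  | [], _ => false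
  | c :: rest, stack =>
    if isCloser c then
      match stack with
      | [] => true
      | top :: stk => if top = openerOf c then lineRaises rest stk else false
    else lineRaises rest (c :: stack)

-- Pre_ excludes exactly the inputs on which Python A raises IndexError (a line whose first
-- anomaly is a closing bracket with nothing open).
def Pre_disgardCorrupted (my_input : List String) : Prop :=
  ∀ line ∈ my_input, lineRaises line.toList [] = false
instance (my_input : List String) : Decidable (Pre_disgardCorrupted my_input) := by
  unfold Pre_disgardCorrupted; infer_instance

def pvWitness_disgardCorrupted : List String := ["([])", "(]", "<<{}>>", "a)", "(", ""]

def Spec_disgardCorrupted (my_input : List String) (out : List String) : Prop :=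
  out = disgardCorrupted_alt my_input
instance (my_input : List String) (out : List String) : Decidable (Spec_disgardCorrupted my_input out) := by
  unfold Spec_disgardCorrupted; infer_instance

-- ===== CLAIM (what is proved, stated in full; the proofs are below) =====
def Claim_equal_disgardCorrupted : Prop :=
  ∀ (my_input : List String), Dom_disgardCorrupted my_input →
    Pre_disgardCorrupted my_input →
    Spec_disgardCorrupted my_input (disgardCorrupted my_input)

-- ===== LEMMAS AND PROOFS =====

-- A's back-to-front stack scan agrees with B's front-to-back one (both flag corruption,
-- and A's port flags the empty-stack case true just as B does).
lemma lineRemovedA_eq_corruptedB (cs : List Char) :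
    ∀ stack : List Char, lineRemovedA cs stack = corruptedB cs stack.reverse := by
  induction cs with
  | nil => intro stack; rfl
  | cons c rest ih =>
    intro stack
    have hpairs : pairsA c = if isCloser c then some (openerOf c) else none := by
      simp [pairsA, isCloser, openerOf]
      split_ifs <;> simp_all
    simp only [lineRemovedA, corruptedB, hpairs]
    by_cases hc : isCloser c
    · simp only [hc, if_true]
      cases hs : stack.reverse with
      | nil =>
        have : stack = [] := by simpa using congrArg List.reverse hs
        subst this; rfl
      | cons top stk =>
        have hstack : stack = stk.reverse ++ [top] := by
          have := congrArg List.reverse hs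
          simpa using this
        subst hstack
        have hget : PySem.List.pyGet? (stk.reverse ++ [top]) (-1) = some top := by
          simp [PySem.List.pyGet?, PySem.List.pyIdx?]
        rw [hget]
        by_cases htop : top = openerOf c
        · subst htop
          simp [ih stk.reverse]
        · simp [htop]
    · simp only [hc]
      rw [ih (stack ++ [c])]
      simp

-- foldl-with-remove over the very list being folded equals filter: invariant form.
lemma foldl_remove_eq_filter (P : String → Bool) :
    ∀ (lines pre : List String), (∀ x ∈ pre, P x = false) →
      lines.foldl
        (fun altered line =>
          if P line then (PySem.List.remove? altered line).getD altered else altered)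
        (pre ++ lines)
      = pre ++ lines.filter (fun l => !P l) := by
  intro lines
  induction lines with
  | nil => intro pre _; simp
  | cons x xs ih =>
    intro pre hpre
    simp only [List.foldl_cons]
    by_cases hx : P x = true
    · have hxpre : x ∉ pre := fun hmem => by simp [hpre x hmem] at hx
      have hrem : PySem.List.remove? (pre ++ x :: xs) x = some (pre ++ xs) := by
        clear ih hpre
        induction pre with
        | nil => simp [PySem.List.remove?_cons_self]
        | cons h t iht =>
          have hne : h ≠ x := fun he => hxpre (by simp [he])
          have : x ∉ t := fun hm => hxpre (by simp [hm])
          rw [List.cons_append, PySem.List.remove?_cons_of_ne _ hne, iht this]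
          rfl
      simp only [hx, if_true, hrem, Option.getD_some]
      rw [ih pre hpre]
      simp [List.filter, hx]
    · have hx' : P x = false := by simpa using hx
      simp only [hx', Bool.false_eq_true, if_false]
      have : pre ++ x :: xs = (pre ++ [x]) ++ xs := by simp
      rw [this, ih (pre ++ [x]) (by intro y hy; rcases List.mem_append.1 hy with h | h
                                    · exact hpre y h
                                    · simp at h; subst h; exact hx')]
      simp [List.filter, hx']

-- ===== VERDICT (by name: the statement is the Claim_ definition above) =====
theorem disgardCorrupted_spec : Claim_equal_disgardCorrupted := by
  intro my_input _ _
  unfold Spec_disgardCorrupted disgardCorrupted disgardCorrupted_alt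
  have hfn : (fun (altered : List String) (line : String) =>
      if lineRemovedA line.toList [] then (PySem.List.remove? altered line).getD altered
      else altered)
    = (fun (altered : List String) (line : String) =>
      if corruptedB line.toList [] then (PySem.List.remove? altered line).getD altered
      else altered) := by
    funext altered line
    rw [lineRemovedA_eq_corruptedB line.toList []]
    rfl
  rw [hfn]
  have := foldl_remove_eq_filter (fun line => corruptedB line.toList []) my_input [] (by simp)
  simpa using this
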